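-- pv_equiv track=rewrite | github.com/notsofun/Master_Thesis | data_preanalysis/Chinese/analyze.py | extract_examples_for_pairs
-- ===== SOURCE A (Python) =====
-- def extract_examples_for_pairs(df_texts, tokenized_texts, pairs, max_examples=3):
--     # pairs: set of tuples (core, term)
--     examples = {p: [] for p in pairs}
--     for raw, tokens in zip(df_texts, tokenized_texts):
--         uniq = set(tokens)
--         for p in list(pairs):
--             core, term = p
--             if core in uniq and term in uniq:
--                 examples[p].append(raw.strip())
--                 if len(examples[p]) >= max_examples:
--                     pairs.discard(p)  # optional: once we have enough, stop collecting for this pair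
--         if not pairs:
--             break
--     return examples
-- ===== SOURCE B (Python) =====
-- def extract_examples_for_pairs(df_texts, tokenized_texts, pairs, max_examples=3):
--     # Pair-major re-implementation: each pair independently scans the texts and
--     # stops as soon as it has enough examples; `pairs` is left unmodified.
--     token_sets = [set(t) for t in tokenized_texts]
--     texts = list(zip(df_texts, token_sets))
--     examples = {}
--     for p in pairs:
--         core, term = p
--         collected = []
--         for raw, uniq in texts:
--             if core in uniq and term in uniq:
--                 collected.append(raw.strip())
--                 if len(collected) >= max_examples:
--                     break
--         examples[p] = collected
--     return examples
-- ===== Notes on version B (the rewrite author's own statement) =====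
-- stated objective: alternative
-- what changed: Text-major loop that mutates the shared pairs set (discard + global break) is replaced by an independent pair-major scan with an early break per pair once max_examples matches are collected, leaving pairs unmodified.
import Mathlib
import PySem

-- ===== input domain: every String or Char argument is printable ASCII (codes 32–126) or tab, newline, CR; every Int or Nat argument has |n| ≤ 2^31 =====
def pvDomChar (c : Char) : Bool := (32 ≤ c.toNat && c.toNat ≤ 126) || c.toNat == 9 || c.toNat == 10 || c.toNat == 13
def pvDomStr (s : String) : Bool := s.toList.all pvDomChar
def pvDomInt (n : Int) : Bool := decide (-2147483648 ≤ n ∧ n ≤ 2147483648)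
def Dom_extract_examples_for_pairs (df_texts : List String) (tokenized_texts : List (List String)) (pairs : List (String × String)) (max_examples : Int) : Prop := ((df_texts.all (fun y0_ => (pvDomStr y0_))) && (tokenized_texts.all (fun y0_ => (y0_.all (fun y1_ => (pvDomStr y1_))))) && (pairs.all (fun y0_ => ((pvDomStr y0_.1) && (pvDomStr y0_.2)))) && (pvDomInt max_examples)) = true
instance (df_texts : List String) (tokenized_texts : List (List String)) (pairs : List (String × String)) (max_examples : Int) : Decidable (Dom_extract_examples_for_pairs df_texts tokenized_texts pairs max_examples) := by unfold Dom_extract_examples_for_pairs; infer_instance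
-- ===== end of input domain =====

-- B replaces A's text-major loop (which mutates the shared pairs set) by an independent
-- pair-major scan with an early break per pair; equivalence is about the RETURN value only
-- (Python A mutates its `pairs` set argument in place, B does not).


-- ===== PORT A =====
-- body of A's inner `for p in list(pairs)` loop; state = (examples, pairs)
def pvAInnerF (m : Int) (raw : String) (uniq : PySem.Set String)
    (st : PySem.Dict (String × String) (List String) × PySem.Set (String × String))
    (p : String × String) :
    PySem.Dict (String × String) (List String) × PySem.Set (String × String) :=
  if uniq.contains p.1 && uniq.contains p.2 then
    let ex2 := st.1.modify p [] (fun l => l ++ [PySem.Str.strip raw])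
    if m ≤ ((ex2.getD p []).length : Int) then (ex2, PySem.Set.discard st.2 p)
    else (ex2, st.2)
  else st

-- A's outer `for raw, tokens in zip(...)` loop with the `if not pairs: break`
def pvALoop (m : Int) : List (String × List String) →
    PySem.Dict (String × String) (List String) → PySem.Set (String × String) →
    PySem.Dict (String × String) (List String)
  | [], ex, _ => ex
  | (raw, tokens) :: rest, ex, ps =>
    let uniq : PySem.Set String := PySem.Set.ofList tokens
    let st := ps.foldl (pvAInnerF m raw uniq) (ex, ps)
    if st.2.isEmpty then st.1 else pvALoop m rest st.1 st.2

def extract_examples_for_pairs (df_texts : List String) (tokenized_texts : List (List String)) (pairs : List (String × String)) (max_examples : Int) : List (String × String × List String) :=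
  let ps : PySem.Set (String × String) := PySem.Set.ofList pairs
  let ex0 := ps.foldl (fun d p => d.insert p ([] : List String)) PySem.Dict.empty
  (pvALoop max_examples (df_texts.zip tokenized_texts) ex0 ps).items.map (fun kv => (kv.1.1, kv.1.2, kv.2))

-- ===== PORT B =====
-- B's inner `for raw, uniq in texts` loop with the per-pair break
def pvCollect (m : Int) (core term : String) :
    List (String × PySem.Set String) → List String → List String
  | [], acc => acc
  | (raw, uniq) :: rest, acc =>
    if uniq.contains core && uniq.contains term then
      let acc2 := acc ++ [PySem.Str.strip raw]
      if m ≤ (acc2.length : Int) then acc2 else pvCollect m core term rest acc2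
    else pvCollect m core term rest acc

def extract_examples_for_pairs_alt (df_texts : List String) (tokenized_texts : List (List String)) (pairs : List (String × String)) (max_examples : Int) : List (String × String × List String) :=
  let texts := df_texts.zip (tokenized_texts.map (fun t => PySem.Set.ofList t))
  (pairs.foldl (fun d p => d.insert p (pvCollect max_examples p.1 p.2 texts [])) PySem.Dict.empty).items.map (fun kv => (kv.1.1, kv.1.2, kv.2))

-- ===== PRECONDITION & SPEC =====
def Spec_extract_examples_for_pairs (df_texts : List String) (tokenized_texts : List (List String)) (pairs : List (String × String)) (max_examples : Int) (out : List (String × String × List String)) : Prop := out = extract_examples_for_pairs_alt df_texts tokenized_texts pairs max_examples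
instance (df_texts : List String) (tokenized_texts : List (List String)) (pairs : List (String × String)) (max_examples : Int) (out : List (String × String × List String)) : Decidable (Spec_extract_examples_for_pairs df_texts tokenized_texts pairs max_examples out) := by unfold Spec_extract_examples_for_pairs; infer_instance

-- ===== CLAIM (what is proved, stated in full; the proofs are below) =====
def Claim_equal_extract_examples_for_pairs : Prop := ∀ (df_texts : List String) (tokenized_texts : List (List String)) (pairs : List (String × String)) (max_examples : Int), Dom_extract_examples_for_pairs df_texts tokenized_texts pairs max_examples → Spec_extract_examples_for_pairs df_texts tokenized_texts pairs max_examples (extract_examples_for_pairs df_texts tokenized_texts pairs max_examples)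

-- ===== LEMMAS AND PROOFS =====

-- fold of insert with a key-determined value: lookup
theorem pv_getD_fold_insert {ν : Type} (g : String × String → ν) (dflt : ν) :
    ∀ (l : List (String × String)) (d : PySem.Dict (String × String) ν) (k : String × String),
    (l.foldl (fun d p => d.insert p (g p)) d).getD k dflt
      = if k ∈ l then g k else d.getD k dflt := by
  intro l
  induction l with
  | nil => intro d k; simp
  | cons p l ih =>
    intro d k
    rw [List.foldl_cons, ih]
    by_cases hk : k ∈ l
    · simp [hk]
    · rw [PySem.Dict.getD_insert]
      by_cases he : k = p <;> simp [hk, he]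

-- A's inner fold: effect on the examples dict
theorem pv_inner_getD (m : Int) (raw : String) (uniq : PySem.Set String) (q : String × String) :
    ∀ (l : List (String × String)) (ex : PySem.Dict (String × String) (List String))
      (s0 : PySem.Set (String × String)),
    l.Nodup → (∀ p ∈ l, ex.contains p = true) →
    (l.foldl (pvAInnerF m raw uniq) (ex, s0)).1.getD q []
      = if q ∈ l ∧ (uniq.contains q.1 && uniq.contains q.2) = true
        then ex.getD q [] ++ [PySem.Str.strip raw] else ex.getD q [] := by
  intro l
  induction l with
  | nil => intro ex s0 _ _; simp
  | cons p l ih =>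
    intro ex s0 hnd hc
    obtain ⟨hp, hl⟩ := List.nodup_cons.mp hnd
    have hcp : ex.contains p = true := hc p (List.mem_cons_self)
    have hcl : ∀ q ∈ l, (ex.insert p (ex.getD p [] ++ [PySem.Str.strip raw])).contains q = true := by
      intro r hr
      rw [PySem.Dict.contains_insert]
      simp [hc r (List.mem_cons_of_mem _ hr)]
    rw [List.foldl_cons]
    by_cases hmatch : (uniq.contains p.1 && uniq.contains p.2) = true
    · have hstep1 : (pvAInnerF m raw uniq (ex, s0) p).1
          = ex.insert p (ex.getD p [] ++ [PySem.Str.strip raw]) := by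
        simp only [pvAInnerF, PySem.Dict.modify, hmatch, if_true]
        split <;> rfl
      rcases h2 : (pvAInnerF m raw uniq (ex, s0) p) with ⟨ex2, s2⟩
      have hex2 : ex2 = ex.insert p (ex.getD p [] ++ [PySem.Str.strip raw]) := by
        rw [← hstep1, h2]
      rw [ih ex2 s2 hl (hex2 ▸ hcl), hex2]
      by_cases hq : q = p
      · subst hq
        rw [if_neg (fun h => hp h.1), PySem.Dict.getD_insert, if_pos rfl,
          if_pos ⟨List.mem_cons_self, hmatch⟩]
      · rw [PySem.Dict.getD_insert_of_ne _ _ _ hq]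
        simp [List.mem_cons, hq]
    · have hstep : pvAInnerF m raw uniq (ex, s0) p = (ex, s0) := by
        simp only [pvAInnerF]; rw [if_neg hmatch]
      rw [hstep, ih ex s0 hl (fun r hr => hc r (List.mem_cons_of_mem _ hr))]
      by_cases hq : q = p
      · subst hq
        rw [if_neg (fun h => hmatch h.2), if_neg (fun h => hmatch h.2)]
      · simp [List.mem_cons, hq]

-- A's inner fold: keys are unchanged
theorem pv_inner_keys (m : Int) (raw : String) (uniq : PySem.Set String) :
    ∀ (l : List (String × String)) (ex : PySem.Dict (String × String) (List String))
      (s0 : PySem.Set (String × String)),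
    (∀ p ∈ l, ex.contains p = true) →
    (l.foldl (pvAInnerF m raw uniq) (ex, s0)).1.keys = ex.keys := by
  intro l
  induction l with
  | nil => intro ex s0 _; rfl
  | cons p l ih =>
    intro ex s0 hc
    have hcp : ex.contains p = true := hc p List.mem_cons_self
    have hkeys : (pvAInnerF m raw uniq (ex, s0) p).1.keys = ex.keys := by
      simp only [pvAInnerF, PySem.Dict.modify]
      split
      · split <;> exact PySem.Dict.keys_insert_of_contains ex _ hcp
      · rfl
    rcases h2 : (pvAInnerF m raw uniq (ex, s0) p) with ⟨ex2, s2⟩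
    rw [h2] at hkeys
    have hc2 : ∀ r ∈ l, ex2.contains r = true := by
      intro r hr
      rw [PySem.Dict.contains_iff_mem_keys, hkeys, ← PySem.Dict.contains_iff_mem_keys]
      exact hc r (List.mem_cons_of_mem _ hr)
    rw [List.foldl_cons, h2, ih ex2 s2 hc2, hkeys]

-- A's inner fold: the pairs set shrinks (sublist of what it was)
theorem pv_inner_sublist (m : Int) (raw : String) (uniq : PySem.Set String) :
    ∀ (l : List (String × String)) (ex : PySem.Dict (String × String) (List String))
      (s0 : PySem.Set (String × String)),
    (l.foldl (pvAInnerF m raw uniq) (ex, s0)).2.Sublist s0 := by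
  intro l
  induction l with
  | nil => intro ex s0; exact List.Sublist.refl _
  | cons p l ih =>
    intro ex s0
    have hsub : (pvAInnerF m raw uniq (ex, s0) p).2.Sublist s0 := by
      simp only [pvAInnerF]
      split
      · split
        · exact List.filter_sublist
        · exact List.Sublist.refl _
      · exact List.Sublist.refl _
    rcases h2 : (pvAInnerF m raw uniq (ex, s0) p) with ⟨ex2, s2⟩
    rw [h2] at hsub
    rw [List.foldl_cons, h2]
    exact (ih ex2 s2).trans hsub

-- A's inner fold: membership in the resulting pairs set
theorem pv_inner_mem (m : Int) (raw : String) (uniq : PySem.Set String) (q : String × String) :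
    ∀ (l : List (String × String)) (ex : PySem.Dict (String × String) (List String))
      (s0 : PySem.Set (String × String)),
    l.Nodup → (∀ p ∈ l, ex.contains p = true) →
    (q ∈ (l.foldl (pvAInnerF m raw uniq) (ex, s0)).2
      ↔ q ∈ s0 ∧ ¬(q ∈ l ∧ (uniq.contains q.1 && uniq.contains q.2) = true
                    ∧ m ≤ ((ex.getD q []).length : Int) + 1)) := by
  intro l
  induction l with
  | nil => intro ex s0 _ _; simp
  | cons p l ih =>
    intro ex s0 hnd hc
    obtain ⟨hp, hl⟩ := List.nodup_cons.mp hnd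
    have hcp : ex.contains p = true := hc p List.mem_cons_self
    have hcl : ∀ r ∈ l, (ex.insert p (ex.getD p [] ++ [PySem.Str.strip raw])).contains r = true := by
      intro r hr
      rw [PySem.Dict.contains_insert]
      simp [hc r (List.mem_cons_of_mem _ hr)]
    rw [List.foldl_cons]
    by_cases hmatch : (uniq.contains p.1 && uniq.contains p.2) = true
    · by_cases hthr : m ≤ ((ex.getD p []).length : Int) + 1
      · have hthr' : m ≤ (((ex.getD p [] ++ [PySem.Str.strip raw]).length : Nat) : Int) := by
          simpa using hthr
        have hstep : pvAInnerF m raw uniq (ex, s0) p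
            = (ex.insert p (ex.getD p [] ++ [PySem.Str.strip raw]), s0.discard p) := by
          simp only [pvAInnerF, PySem.Dict.modify]
          rw [if_pos hmatch, PySem.Dict.getD_insert, if_pos rfl, if_pos hthr']
        rw [hstep, ih _ _ hl hcl]
        by_cases hq : q = p
        · subst hq
          have hm2 : q.1 ∈ uniq ∧ q.2 ∈ uniq := by simpa using hmatch
          simp [PySem.Set.mem_discard, hthr, hm2]
        · rw [PySem.Dict.getD_insert_of_ne _ _ _ hq]
          simp [PySem.Set.mem_discard, hq, List.mem_cons]
      · have hthr' : ¬ m ≤ (((ex.getD p [] ++ [PySem.Str.strip raw]).length : Nat) : Int) := by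
          simpa using hthr
        have hstep : pvAInnerF m raw uniq (ex, s0) p
            = (ex.insert p (ex.getD p [] ++ [PySem.Str.strip raw]), s0) := by
          simp only [pvAInnerF, PySem.Dict.modify]
          rw [if_pos hmatch, PySem.Dict.getD_insert, if_pos rfl, if_neg hthr']
        rw [hstep, ih _ _ hl hcl]
        by_cases hq : q = p
        · subst hq
          simp [hp, hthr]
        · rw [PySem.Dict.getD_insert_of_ne _ _ _ hq]
          simp [hq, List.mem_cons]
    · have hstep : pvAInnerF m raw uniq (ex, s0) p = (ex, s0) := by
        simp only [pvAInnerF]; rw [if_neg hmatch]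
      rw [hstep, ih _ _ hl (fun r hr => hc r (List.mem_cons_of_mem _ hr))]
      by_cases hq : q = p
      · subst hq
        have hm2 : ¬(q.1 ∈ uniq ∧ q.2 ∈ uniq) := by simpa using hmatch
        simp [hp, hm2]
      · simp [hq, List.mem_cons]

-- A's outer loop: keys unchanged
theorem pv_loop_keys (m : Int) :
    ∀ (texts : List (String × List String)) (ex : PySem.Dict (String × String) (List String))
      (ps : PySem.Set (String × String)),
    ps.Nodup → (∀ p ∈ ps, ex.contains p = true) →
    (pvALoop m texts ex ps).keys = ex.keys := by
  intro texts
  induction texts with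
  | nil => intro ex ps _ _; rfl
  | cons t rest ih =>
    rcases t with ⟨raw, tokens⟩
    intro ex ps hnd hc
    simp only [pvALoop]
    rcases h2 : List.foldl (pvAInnerF m raw (PySem.Set.ofList tokens)) (ex, ps) ps with ⟨ex1, ps1⟩
    have hkeys : ex1.keys = ex.keys := by
      have h := pv_inner_keys m raw (PySem.Set.ofList tokens) ps ex ps hc
      rw [h2] at h; exact h
    have hsub : ps1.Sublist ps := by
      have h := pv_inner_sublist m raw (PySem.Set.ofList tokens) ps ex ps
      rw [h2] at h; exact h
    split
    · exact hkeys
    · have hnd1 : ps1.Nodup := hnd.sublist hsub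
      have hc1 : ∀ p ∈ ps1, ex1.contains p = true := by
        intro p hp1
        rw [PySem.Dict.contains_iff_mem_keys, hkeys, ← PySem.Dict.contains_iff_mem_keys]
        exact hc p (hsub.subset hp1)
      rw [ih ex1 ps1 hnd1 hc1, hkeys]

-- A's outer loop computes, per key, exactly B's collector
theorem pv_loop_getD (m : Int) (q : String × String) :
    ∀ (texts : List (String × List String)) (ex : PySem.Dict (String × String) (List String))
      (ps : PySem.Set (String × String)),
    ps.Nodup → (∀ p ∈ ps, ex.contains p = true) →
    (pvALoop m texts ex ps).getD q []
      = if q ∈ ps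
        then pvCollect m q.1 q.2 (texts.map (fun rt => (rt.1, PySem.Set.ofList rt.2))) (ex.getD q [])
        else ex.getD q [] := by
  intro texts
  induction texts with
  | nil => intro ex ps _ _; simp [pvALoop, pvCollect]
  | cons t rest ih =>
    rcases t with ⟨raw, tokens⟩
    intro ex ps hnd hc
    simp only [pvALoop, List.map_cons]
    rcases h2 : List.foldl (pvAInnerF m raw (PySem.Set.ofList tokens)) (ex, ps) ps with ⟨ex1, ps1⟩
    have hkeys : ex1.keys = ex.keys := by
      have h := pv_inner_keys m raw (PySem.Set.ofList tokens) ps ex ps hc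
      rw [h2] at h; exact h
    have hsub : ps1.Sublist ps := by
      have h := pv_inner_sublist m raw (PySem.Set.ofList tokens) ps ex ps
      rw [h2] at h; exact h
    have hnd1 : ps1.Nodup := hnd.sublist hsub
    have hc1 : ∀ p ∈ ps1, ex1.contains p = true := by
      intro p hp1
      rw [PySem.Dict.contains_iff_mem_keys, hkeys, ← PySem.Dict.contains_iff_mem_keys]
      exact hc p (hsub.subset hp1)
    have hget : ex1.getD q []
        = if q ∈ ps ∧ ((PySem.Set.ofList tokens).contains q.1 && (PySem.Set.ofList tokens).contains q.2) = true
          then ex.getD q [] ++ [PySem.Str.strip raw] else ex.getD q [] := by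
      have h := pv_inner_getD m raw (PySem.Set.ofList tokens) q ps ex ps hnd hc
      rw [h2] at h; exact h
    have hmem : q ∈ ps1 ↔ q ∈ ps ∧ ¬(q ∈ ps ∧ ((PySem.Set.ofList tokens).contains q.1 && (PySem.Set.ofList tokens).contains q.2) = true
        ∧ m ≤ ((ex.getD q []).length : Int) + 1) := by
      have h := pv_inner_mem m raw (PySem.Set.ofList tokens) q ps ex ps hnd hc
      rw [h2] at h; exact h
    have hlen : (((ex.getD q [] ++ [PySem.Str.strip raw]).length : Nat) : Int)
        = ((ex.getD q []).length : Int) + 1 := by simp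
    by_cases hqps : q ∈ ps
    · rw [if_pos hqps]
      simp only [pvCollect]
      by_cases hcond : ((PySem.Set.ofList tokens).contains q.1 && (PySem.Set.ofList tokens).contains q.2) = true
      · have hval : ex1.getD q [] = ex.getD q [] ++ [PySem.Str.strip raw] := by
          rw [hget, if_pos ⟨hqps, hcond⟩]
        rw [if_pos hcond]
        by_cases hthr : m ≤ ((ex.getD q []).length : Int) + 1
        · have hq1 : q ∉ ps1 := by
            rw [hmem]; rintro ⟨-, hn⟩; exact hn ⟨hqps, hcond, hthr⟩
          rw [if_pos (hlen ▸ hthr : m ≤ (((ex.getD q [] ++ [PySem.Str.strip raw]).length : Nat) : Int))]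
          by_cases hE : ps1.isEmpty = true
          · rw [if_pos hE, hval]
          · rw [if_neg hE, ih ex1 ps1 hnd1 hc1, if_neg hq1, hval]
        · have hq1 : q ∈ ps1 := hmem.mpr ⟨hqps, fun h => hthr h.2.2⟩
          have hE : ¬ ps1.isEmpty = true := by
            rw [List.isEmpty_iff]; intro h; rw [h] at hq1; exact List.not_mem_nil hq1
          rw [if_neg (hlen ▸ hthr : ¬ m ≤ (((ex.getD q [] ++ [PySem.Str.strip raw]).length : Nat) : Int))]
          rw [if_neg hE, ih ex1 ps1 hnd1 hc1, if_pos hq1, hval]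
      · have hq1 : q ∈ ps1 := hmem.mpr ⟨hqps, fun h => hcond h.2.1⟩
        have hval : ex1.getD q [] = ex.getD q [] := by
          rw [hget, if_neg (fun h => hcond h.2)]
        have hE : ¬ ps1.isEmpty = true := by
          rw [List.isEmpty_iff]; intro h; rw [h] at hq1; exact List.not_mem_nil hq1
        rw [if_neg hcond, if_neg hE, ih ex1 ps1 hnd1 hc1, if_pos hq1, hval]
    · rw [if_neg hqps]
      have hq1 : q ∉ ps1 := fun h => hqps (hsub.subset h)
      have hval : ex1.getD q [] = ex.getD q [] := by
        rw [hget, if_neg (fun h => hqps h.1)]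
      by_cases hE : ps1.isEmpty = true
      · rw [if_pos hE, hval]
      · rw [if_neg hE, ih ex1 ps1 hnd1 hc1, if_neg hq1, hval]

-- ===== VERDICT (by name: the statement is the Claim_ definition above) =====
theorem extract_examples_for_pairs_spec : Claim_equal_extract_examples_for_pairs := by
  intro df toks pairs m _
  unfold Spec_extract_examples_for_pairs
  simp only [extract_examples_for_pairs, extract_examples_for_pairs_alt]
  congr 1
  have hP : (PySem.Set.ofList pairs).Nodup := PySem.Set.nodup_ofList pairs
  have hkeys0 : ((PySem.Set.ofList pairs).foldl
      (fun d p => d.insert p ([] : List String)) PySem.Dict.empty).keys = PySem.Set.ofList pairs := by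
    rw [PySem.Dict.keys_foldl_insert (PySem.Set.ofList pairs) (fun _ _ => ([] : List String)) PySem.Dict.empty]
    show PySem.Set.update ([] : PySem.Set (String × String)) (PySem.Set.ofList pairs) = PySem.Set.ofList pairs
    rw [show PySem.Set.update ([] : PySem.Set (String × String)) (PySem.Set.ofList pairs)
        = PySem.Set.ofList (PySem.Set.ofList pairs) from (PySem.Set.ofList_eq_foldl _)]
    exact PySem.Set.ofList_eq_self_of_nodup _ hP
  have hcont0 : ∀ p ∈ PySem.Set.ofList pairs,
      ((PySem.Set.ofList pairs).foldl (fun d p => d.insert p ([] : List String)) PySem.Dict.empty).contains p = true := by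
    intro p hp
    rw [PySem.Dict.contains_iff_mem_keys, hkeys0]
    exact hp
  have hkeysA : (pvALoop m (df.zip toks)
      ((PySem.Set.ofList pairs).foldl (fun d p => d.insert p ([] : List String)) PySem.Dict.empty)
      (PySem.Set.ofList pairs)).keys = PySem.Set.ofList pairs := by
    rw [pv_loop_keys m (df.zip toks) _ _ hP hcont0, hkeys0]
  have hkeysB : (pairs.foldl (fun d p => d.insert p
      (pvCollect m p.1 p.2 (df.zip (toks.map (fun t => PySem.Set.ofList t))) [])) PySem.Dict.empty).keys
      = PySem.Set.ofList pairs := by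
    rw [PySem.Dict.keys_foldl_insert pairs
      (fun _ p => pvCollect m p.1 p.2 (df.zip (toks.map (fun t => PySem.Set.ofList t))) []) PySem.Dict.empty]
    exact (PySem.Set.ofList_eq_foldl _).symm
  rw [PySem.Dict.items_eq_map_keys _ (by rw [hkeysA]; exact hP) ([] : List String),
    PySem.Dict.items_eq_map_keys _ (by rw [hkeysB]; exact hP) ([] : List String),
    hkeysA, hkeysB]
  apply List.map_congr_left
  intro p hp
  have hzip : df.zip (toks.map (fun t => PySem.Set.ofList t))
      = (df.zip toks).map (fun rt => (rt.1, PySem.Set.ofList rt.2)) := by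
    rw [List.zip_map_right]
    apply List.map_congr_left
    rintro ⟨a, b⟩ _
    rfl
  have hA : (pvALoop m (df.zip toks)
      ((PySem.Set.ofList pairs).foldl (fun d p => d.insert p ([] : List String)) PySem.Dict.empty)
      (PySem.Set.ofList pairs)).getD p []
      = pvCollect m p.1 p.2 ((df.zip toks).map (fun rt => (rt.1, PySem.Set.ofList rt.2))) [] := by
    rw [pv_loop_getD m p (df.zip toks) _ _ hP hcont0, if_pos hp,
      pv_getD_fold_insert (fun _ => ([] : List String)) [] (PySem.Set.ofList pairs) PySem.Dict.empty p,
      if_pos hp]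
  have hB : (pairs.foldl (fun d p => d.insert p
      (pvCollect m p.1 p.2 (df.zip (toks.map (fun t => PySem.Set.ofList t))) [])) PySem.Dict.empty).getD p []
      = pvCollect m p.1 p.2 (df.zip (toks.map (fun t => PySem.Set.ofList t))) [] := by
    rw [pv_getD_fold_insert (fun p => pvCollect m p.1 p.2 (df.zip (toks.map (fun t => PySem.Set.ofList t))) [])
      [] pairs PySem.Dict.empty p, if_pos ((PySem.Set.mem_ofList pairs p).mp hp)]
  rw [hA, hB, hzip]
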